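-- pv_equiv track=rewrite | github.com/yihucd/advent_of_code_2025 | day9_p2.py | find_nodes_on_same_line
-- ===== SOURCE A (Python) =====
-- def find_nodes_on_same_line(node1, node2):
--     """Find all tiles between two nodes that are on a straight line."""
--     (w1, h1), (w2, h2) = node1, node2
--     result = []
--
--     # Return a empty list of these two nodes are not on a horizontal or vertical line
--     if w1 != w2 and h1 != h2:
--         return result
--
--     if w1 == w2 and h1 != h2:
--         result = [(w1, h) for h in range(min(h1, h2), max(h1, h2) + 1)]
--         return result
--
--     if w1 != w2 and h1 == h2:
--         result = [(w, h1) for w in range(min(w1, w2), max(w1, w2) + 1)]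
--         return result
--
--     if w1 == w2 and h1 == h2: # Same node
--         result = [(w1, h1)]
--         return result
-- ===== SOURCE B (Python) =====
-- def find_nodes_on_same_line(node1, node2):
--     """Find all tiles between two nodes that are on a straight line."""
--     (w1, h1), (w2, h2) = node1, node2
--     dw = (w2 > w1) - (w2 < w1)
--     dh = (h2 > h1) - (h2 < h1)
--     if dw != 0 and dh != 0:
--         return []
--     tiles = []
--     w, h = w1, h1
--     while (w, h) != (w2, h2):
--         tiles.append((w, h))
--         w += dw
--         h += dh
--     tiles.append((w2, h2))
--     if dw < 0 or dh < 0: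
--         tiles.reverse()
--     return tiles
-- ===== Notes on version B (the rewrite author's own statement) =====
-- stated objective: alternative
-- what changed: Replaces A's four min/max-range comprehension branches with a pointer walk: a unit sign step vector from node1, a single while loop appending tiles until node2 is reached, and a final reverse when the walk went downward.
import Mathlib
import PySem

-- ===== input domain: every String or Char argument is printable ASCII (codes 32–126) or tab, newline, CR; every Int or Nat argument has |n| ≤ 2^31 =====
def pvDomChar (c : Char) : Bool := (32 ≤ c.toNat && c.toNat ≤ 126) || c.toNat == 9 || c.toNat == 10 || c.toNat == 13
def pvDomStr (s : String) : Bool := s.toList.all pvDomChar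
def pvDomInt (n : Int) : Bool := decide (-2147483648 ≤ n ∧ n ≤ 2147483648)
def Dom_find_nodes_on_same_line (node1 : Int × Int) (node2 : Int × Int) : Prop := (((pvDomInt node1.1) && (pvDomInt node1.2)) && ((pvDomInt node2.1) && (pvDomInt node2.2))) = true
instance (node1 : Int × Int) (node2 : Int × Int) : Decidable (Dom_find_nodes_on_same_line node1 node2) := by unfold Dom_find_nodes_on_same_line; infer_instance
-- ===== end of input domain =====

-- B replaces A's four min/max-range branches with a pointer walk from node1 toward node2 plus a conditional reverse (alternative decomposition, same cost).

-- ===== PORT A =====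
-- Port of A: four orientation branches, each a comprehension over one min..max range.
def find_nodes_on_same_line (node1 : Int × Int) (node2 : Int × Int) : List (Int × Int) :=
  let w1 := node1.1; let h1 := node1.2
  let w2 := node2.1; let h2 := node2.2
  if w1 ≠ w2 ∧ h1 ≠ h2 then []
  else if w1 = w2 ∧ h1 ≠ h2 then
    (PySem.List.pyRange (min h1 h2) (max h1 h2 + 1) 1).map (fun h => (w1, h))
  else if w1 ≠ w2 ∧ h1 = h2 then
    (PySem.List.pyRange (min w1 w2) (max w1 w2 + 1) 1).map (fun w => (w, h1))
  else [(w1, h1)]  -- w1 = w2 ∧ h1 = h2: same node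

-- ===== PORT B =====
-- The while loop of B, as fuel recursion: the loop runs exactly |w2-w1| + |h2-h1| times
-- (each iteration moves the point one unit toward (w2,h2) along the sign vector).
def pvWalk : Nat → Int → Int → Int → Int → List (Int × Int)
  | 0, _, _, _, _ => []
  | n+1, w, h, dw, dh => (w, h) :: pvWalk n (w + dw) (h + dh) dw dh

-- Python's sign trick (w2 > w1) - (w2 < w1)
def pvSign (a b : Int) : Int := (if b > a then 1 else 0) - (if b < a then 1 else 0)

-- Port of B: unit sign step vector, walk node1 → node2 appending, reverse if the walk went downward.
def find_nodes_on_same_line_alt (node1 : Int × Int) (node2 : Int × Int) : List (Int × Int) :=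
  let w1 := node1.1; let h1 := node1.2
  let w2 := node2.1; let h2 := node2.2
  let dw := pvSign w1 w2
  let dh := pvSign h1 h2
  if dw ≠ 0 ∧ dh ≠ 0 then []
  else
    let tiles := pvWalk ((w2 - w1).natAbs + (h2 - h1).natAbs) w1 h1 dw dh ++ [(w2, h2)]
    if dw < 0 ∨ dh < 0 then tiles.reverse else tiles

-- ===== PRECONDITION & SPEC =====
def Spec_find_nodes_on_same_line (node1 : Int × Int) (node2 : Int × Int) (out : List (Int × Int)) : Prop := out = find_nodes_on_same_line_alt node1 node2
instance (node1 : Int × Int) (node2 : Int × Int) (out : List (Int × Int)) : Decidable (Spec_find_nodes_on_same_line node1 node2 out) := by unfold Spec_find_nodes_on_same_line; infer_instance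

-- ===== CLAIM (what is proved, stated in full; the proofs are below) =====
def Claim_equal_find_nodes_on_same_line : Prop := ∀ (node1 : Int × Int) (node2 : Int × Int), Dom_find_nodes_on_same_line node1 node2 → Spec_find_nodes_on_same_line node1 node2 (find_nodes_on_same_line node1 node2)

-- ===== LEMMAS AND PROOFS =====

-- An upward vertical walk of n steps, plus the endpoint, is the ascending range map.
theorem pvWalk_up (n : Nat) : ∀ h w : Int,
    pvWalk n w h 0 1 ++ [(w, h + n)] = (PySem.List.pyRange h (h + n + 1) 1).map (fun k => (w, k)) := by
  induction n with
  | zero =>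
    intro h w
    simp [pvWalk, PySem.List.pyRange_one_singleton]
  | succ n ih =>
    intro h w
    push_cast
    have h1 : h < h + ((n : Int) + 1) + 1 := by omega
    rw [PySem.List.pyRange_one_cons h1]
    simp only [pvWalk, List.cons_append, List.map_cons, add_zero]
    rw [show h + ((n:Int) + 1) = h + 1 + n by ring, ih (h+1) w]

-- A downward vertical walk of n steps, plus the endpoint, reversed, is the ascending range map.
theorem pvWalk_down (n : Nat) : ∀ h w : Int,
    (pvWalk n w h 0 (-1) ++ [(w, h - n)]).reverse = (PySem.List.pyRange (h - n) (h + 1) 1).map (fun k => (w, k)) := by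
  induction n with
  | zero =>
    intro h w
    simp [pvWalk, PySem.List.pyRange_one_singleton]
  | succ n ih =>
    intro h w
    obtain ⟨m, rfl⟩ : ∃ m, h = m + 1 := ⟨h - 1, by ring⟩
    push_cast
    have h1 : m - (n : Int) ≤ m + 1 := by omega
    rw [show m + 1 - ((n:Int)+1) = m - n by ring, PySem.List.pyRange_one_succ_right h1]
    simp only [pvWalk, List.cons_append, List.reverse_cons, List.map_append, List.map_cons, List.map_nil]
    rw [show w + (0:Int) = w by ring, show m + 1 + (-1:Int) = m by ring, ih m w]

-- A rightward horizontal walk of n steps, plus the endpoint, is the ascending range map.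
theorem pvWalk_right (n : Nat) : ∀ w h : Int,
    pvWalk n w h 1 0 ++ [(w + n, h)] = (PySem.List.pyRange w (w + n + 1) 1).map (fun k => (k, h)) := by
  induction n with
  | zero =>
    intro w h
    simp [pvWalk, PySem.List.pyRange_one_singleton]
  | succ n ih =>
    intro w h
    push_cast
    have h1 : w < w + ((n : Int) + 1) + 1 := by omega
    rw [PySem.List.pyRange_one_cons h1]
    simp only [pvWalk, List.cons_append, List.map_cons, add_zero]
    rw [show w + ((n:Int) + 1) = w + 1 + n by ring, ih (w+1) h]

-- A leftward horizontal walk of n steps, plus the endpoint, reversed, is the ascending range map.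
theorem pvWalk_left (n : Nat) : ∀ w h : Int,
    (pvWalk n w h (-1) 0 ++ [(w - n, h)]).reverse = (PySem.List.pyRange (w - n) (w + 1) 1).map (fun k => (k, h)) := by
  induction n with
  | zero =>
    intro w h
    simp [pvWalk, PySem.List.pyRange_one_singleton]
  | succ n ih =>
    intro w h
    obtain ⟨m, rfl⟩ : ∃ m, w = m + 1 := ⟨w - 1, by ring⟩
    push_cast
    have h1 : m - (n : Int) ≤ m + 1 := by omega
    rw [show m + 1 - ((n:Int)+1) = m - n by ring, PySem.List.pyRange_one_succ_right h1]
    simp only [pvWalk, List.cons_append, List.reverse_cons, List.map_append, List.map_cons, List.map_nil]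
    rw [show m + 1 + (-1:Int) = m by ring, show h + (0:Int) = h by ring, ih m h]

-- ===== VERDICT (by name: the statement is the Claim_ definition above) =====
theorem find_nodes_on_same_line_spec : Claim_equal_find_nodes_on_same_line := by
  intro node1 node2 _
  obtain ⟨w1, h1⟩ := node1
  obtain ⟨w2, h2⟩ := node2
  show find_nodes_on_same_line (w1, h1) (w2, h2) = find_nodes_on_same_line_alt (w1, h1) (w2, h2)
  by_cases hw : w1 = w2 <;> by_cases hh : h1 = h2
  · -- same node
    subst hw; subst hh
    simp [find_nodes_on_same_line, find_nodes_on_same_line_alt, pvSign, pvWalk]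
  · -- vertical: w1 = w2, h1 ≠ h2
    subst hw
    have hdw : pvSign w1 w1 = 0 := by simp [pvSign]
    rcases lt_or_gt_of_ne hh with hlt | hgt
    · have hdh : pvSign h1 h2 = 1 := by simp [pvSign, hlt, not_lt.mpr hlt.le]
      have hn : ((h2 - h1).natAbs : Int) = h2 - h1 := by omega
      have key := pvWalk_up (h2 - h1).natAbs h1 w1
      rw [hn, show h1 + (h2 - h1) = h2 by ring] at key
      simp [find_nodes_on_same_line, find_nodes_on_same_line_alt, hdw, hdh, hh,
        min_eq_left hlt.le, max_eq_right hlt.le, key]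
    · have hdh : pvSign h1 h2 = -1 := by simp [pvSign, hgt, not_lt.mpr hgt.le]
      have hn : ((h2 - h1).natAbs : Int) = h1 - h2 := by omega
      have key := pvWalk_down (h2 - h1).natAbs h1 w1
      rw [hn, show h1 - (h1 - h2) = h2 by ring] at key
      simp [find_nodes_on_same_line, find_nodes_on_same_line_alt, hdw, hdh, hh,
        min_eq_right hgt.le, max_eq_left hgt.le, key]
  · -- horizontal: h1 = h2, w1 ≠ w2
    subst hh
    have hdh : pvSign h1 h1 = 0 := by simp [pvSign]
    rcases lt_or_gt_of_ne hw with hlt | hgt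
    · have hdw : pvSign w1 w2 = 1 := by simp [pvSign, hlt, not_lt.mpr hlt.le]
      have hn : ((w2 - w1).natAbs : Int) = w2 - w1 := by omega
      have key := pvWalk_right (w2 - w1).natAbs w1 h1
      rw [hn, show w1 + (w2 - w1) = w2 by ring] at key
      simp [find_nodes_on_same_line, find_nodes_on_same_line_alt, hdw, hdh, hw,
        min_eq_left hlt.le, max_eq_right hlt.le, key]
    · have hdw : pvSign w1 w2 = -1 := by simp [pvSign, hgt, not_lt.mpr hgt.le]
      have hn : ((w2 - w1).natAbs : Int) = w1 - w2 := by omega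
      have key := pvWalk_left (w2 - w1).natAbs w1 h1
      rw [hn, show w1 - (w1 - w2) = w2 by ring] at key
      simp [find_nodes_on_same_line, find_nodes_on_same_line_alt, hdw, hdh, hw,
        min_eq_right hgt.le, max_eq_left hgt.le, key]
  · -- not collinear: both signs nonzero, both return []
    have hdw : pvSign w1 w2 ≠ 0 := by
      rcases lt_or_gt_of_ne hw with h | h <;>
        simp [pvSign, h, not_lt.mpr h.le]
    have hdh : pvSign h1 h2 ≠ 0 := by
      rcases lt_or_gt_of_ne hh with h | h <;>
        simp [pvSign, h, not_lt.mpr h.le]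
    simp [find_nodes_on_same_line, find_nodes_on_same_line_alt, hw, hh, hdw, hdh]
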